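-- pv_equiv track=rewrite | github.com/rickyurvinaunab/INTRO_11285 | clases/recursividad/laberinto.py | buscar_piso_recursivo
-- ===== SOURCE A (Python) =====
-- def buscar_piso_recursivo(edificio, numero):
--     # caso base 1: si no hay mas pisos
--     if len(edificio) == 0:
--         return -1
--
--     piso = edificio[0]
--
--     # caso base 2: si el numero esta en este piso
--     if numero in piso:
--         return 1
--
--     # caso recursivo: buscar en los demas pisos
--     resultado = buscar_piso_recursivo(edificio[1:], numero)
--
--     # si no se encontro en los demas pisos, mantener -1
--     if resultado == -1:
--         return -1
--     else:
--         return 1 + resultado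
-- ===== SOURCE B (Python) =====
-- def buscar_piso_recursivo(edificio, numero):
--     for i, piso in enumerate(edificio):
--         if numero in piso:
--             return i + 1
--     return -1
-- ===== Notes on version B (the rewrite author's own statement) =====
-- stated objective: simpler
-- what changed: Replaces the recursion on edificio[1:] with -1 sentinel propagation through 1+resultado by a single iterative enumerate scan keeping a running 1-based index.
import Mathlib
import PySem

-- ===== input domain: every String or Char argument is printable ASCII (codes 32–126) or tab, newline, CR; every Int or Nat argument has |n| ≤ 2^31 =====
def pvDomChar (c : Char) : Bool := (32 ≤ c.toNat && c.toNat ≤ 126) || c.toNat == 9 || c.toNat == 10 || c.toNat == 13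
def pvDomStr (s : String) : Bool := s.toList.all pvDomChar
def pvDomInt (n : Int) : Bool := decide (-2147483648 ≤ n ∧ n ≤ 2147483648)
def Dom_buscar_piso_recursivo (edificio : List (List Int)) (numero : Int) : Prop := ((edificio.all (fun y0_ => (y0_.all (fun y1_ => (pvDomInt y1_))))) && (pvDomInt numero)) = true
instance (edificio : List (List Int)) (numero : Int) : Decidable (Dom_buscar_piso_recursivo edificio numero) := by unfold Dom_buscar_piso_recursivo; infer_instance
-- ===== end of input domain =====

-- ===== PORT A =====
-- B replaces A's recursion on edificio[1:] with an iterative enumerate scan (simpler decomposition, no sentinel arithmetic).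
def buscar_piso_recursivo (edificio : List (List Int)) (numero : Int) : Int :=
  match edificio with
  | [] => -1
  | piso :: rest =>
    if numero ∈ piso then 1
    else
      let resultado := buscar_piso_recursivo rest numero
      if resultado = -1 then -1 else 1 + resultado

-- ===== PORT B =====
-- the 'for i, piso in enumerate(edificio)' loop, carrying the running index i
def buscar_piso_recursivo_alt_loop (numero : Int) (i : Int) (edificio : List (List Int)) : Int :=
  match edificio with
  | [] => -1
  | piso :: rest => if numero ∈ piso then i + 1 else buscar_piso_recursivo_alt_loop numero (i + 1) rest

def buscar_piso_recursivo_alt (edificio : List (List Int)) (numero : Int) : Int :=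
  buscar_piso_recursivo_alt_loop numero 0 edificio

-- ===== PRECONDITION & SPEC =====
def Spec_buscar_piso_recursivo (edificio : List (List Int)) (numero : Int) (out : Int) : Prop := out = buscar_piso_recursivo_alt edificio numero
instance (edificio : List (List Int)) (numero : Int) (out : Int) : Decidable (Spec_buscar_piso_recursivo edificio numero out) := by unfold Spec_buscar_piso_recursivo; infer_instance

-- ===== CLAIM =====
def Claim_equal_buscar_piso_recursivo : Prop := ∀ (edificio : List (List Int)) (numero : Int), Dom_buscar_piso_recursivo edificio numero → Spec_buscar_piso_recursivo edificio numero (buscar_piso_recursivo edificio numero)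

-- ===== LEMMAS AND PROOFS =====
theorem A_neg_one_or_pos (edificio : List (List Int)) (numero : Int) :
    buscar_piso_recursivo edificio numero = -1 ∨ 1 ≤ buscar_piso_recursivo edificio numero := by
  induction edificio with
  | nil => simp [buscar_piso_recursivo]
  | cons piso rest ih =>
    simp only [buscar_piso_recursivo]
    split_ifs with h1 h2
    · omega
    · omega
    · rcases ih with h | h
      · exact absurd h h2
      · omega

theorem loop_eq (edificio : List (List Int)) (numero : Int) (i : Int) :
    buscar_piso_recursivo_alt_loop numero i edificio =
      if buscar_piso_recursivo edificio numero = -1 then -1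
      else i + buscar_piso_recursivo edificio numero := by
  induction edificio generalizing i with
  | nil => simp [buscar_piso_recursivo_alt_loop, buscar_piso_recursivo]
  | cons piso rest ih =>
    simp only [buscar_piso_recursivo_alt_loop, buscar_piso_recursivo]
    by_cases h1 : numero ∈ piso
    · simp [h1]
    · rw [if_neg h1, if_neg h1, ih]
      rcases A_neg_one_or_pos rest numero with h | h
      · simp [h]
      · have hne : buscar_piso_recursivo rest numero ≠ -1 := by omega
        have hne2 : ¬ (1 + buscar_piso_recursivo rest numero = -1) := by omega
        simp only [if_neg hne, if_neg hne2]
        ring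

-- ===== VERDICT =====
theorem buscar_piso_recursivo_spec : Claim_equal_buscar_piso_recursivo := by
  intro edificio numero _
  unfold Spec_buscar_piso_recursivo buscar_piso_recursivo_alt
  rw [loop_eq]
  rcases A_neg_one_or_pos edificio numero with h | h
  · simp [h]
  · split_ifs with h1
    · omega
    · omega
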